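-- pv_equiv track=rewrite | github.com/alexandrealfa/Medicall_Api | app/views/__init__.py | is_bad_request
-- ===== SOURCE A (Python) =====
-- def is_bad_request(body, valid_keys):
--     is_bad = False
--
--     body_keys = [k for k in body.keys()]
--     reference = [k for k in valid_keys]
--
--     for k in body_keys:
--         if k not in reference:
--             is_bad = True
--
--     return is_bad
-- ===== SOURCE B (Python) =====
-- def is_bad_request(body, valid_keys):
--     keys = sorted(body.keys())
--     ref = sorted(valid_keys)
--     j = 0
--     for k in keys:
--         while j < len(ref) and ref[j] < k:
--             j += 1
--         if j == len(ref) or ref[j] != k: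
--             return True
--     return False
-- ===== Notes on version B (the rewrite author's own statement) =====
-- stated objective: alternative
-- what changed: Replaces A's per-key membership scan with a boolean accumulator by a sort-then-merge subset check: both key collections are sorted once and a single two-pointer scan with early return decides whether some body key is missing.
import Mathlib
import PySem

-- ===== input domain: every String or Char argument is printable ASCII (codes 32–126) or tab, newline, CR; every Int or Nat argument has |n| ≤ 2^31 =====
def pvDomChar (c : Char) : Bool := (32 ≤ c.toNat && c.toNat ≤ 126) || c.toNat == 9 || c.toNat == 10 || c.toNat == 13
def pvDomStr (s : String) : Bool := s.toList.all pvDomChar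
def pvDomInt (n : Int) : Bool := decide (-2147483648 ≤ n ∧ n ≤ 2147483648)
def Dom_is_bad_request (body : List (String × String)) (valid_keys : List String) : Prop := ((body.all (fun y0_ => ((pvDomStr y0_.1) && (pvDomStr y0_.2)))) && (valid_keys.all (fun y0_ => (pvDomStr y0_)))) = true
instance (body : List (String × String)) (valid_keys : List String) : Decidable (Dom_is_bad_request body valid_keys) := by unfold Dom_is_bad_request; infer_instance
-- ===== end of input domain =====

-- B replaces A's per-key membership loop by a sort-then-merge subset check (alternative algorithm).
-- ===== PORT A =====
def is_bad_request (body : List (String × String)) (valid_keys : List String) : Bool :=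
  let body_keys := (PySem.Dict.keys (PySem.Dict.mk body)).map (fun k => k)
  let reference := valid_keys.map (fun k => k)
  body_keys.foldl (fun is_bad k => if !(reference.contains k) then true else is_bad) false

-- ===== PORT B =====
-- the for/while loop of Source B: advance through the sorted reference (the while = dropWhile),
-- return True at the first missing key, recurse on the remaining keys with the advanced reference
def mergeMiss : List String → List String → Bool
  | [], _ => false
  | k :: ks, ref =>
    match ref.dropWhile (fun r => decide (r < k)) with
    | [] => true
    | r :: t => if r ≠ k then true else mergeMiss ks (r :: t)

def is_bad_request_alt (body : List (String × String)) (valid_keys : List String) : Bool :=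
  let keys := PySem.List.sorted (PySem.Dict.keys (PySem.Dict.mk body)) (fun x => x) false
  let ref := PySem.List.sorted valid_keys (fun x => x) false
  mergeMiss keys ref

-- ===== PRECONDITION & SPEC =====
def Spec_is_bad_request (body : List (String × String)) (valid_keys : List String) (out : Bool) : Prop := out = is_bad_request_alt body valid_keys
instance (body : List (String × String)) (valid_keys : List String) (out : Bool) : Decidable (Spec_is_bad_request body valid_keys out) := by unfold Spec_is_bad_request; infer_instance

-- ===== CLAIM (what is proved, stated in full; the proofs are below) =====
def Claim_equal_is_bad_request : Prop := ∀ (body : List (String × String)) (valid_keys : List String), Dom_is_bad_request body valid_keys → Spec_is_bad_request body valid_keys (is_bad_request body valid_keys)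

-- ===== LEMMAS AND PROOFS =====

lemma foldl_flag (l : List String) (p : String → Bool) (b : Bool) :
    l.foldl (fun is_bad k => if !(p k) then true else is_bad) b = (b || l.any (fun k => !(p k))) := by
  induction l generalizing b with
  | nil => simp
  | cons x xs ih =>
    simp only [List.foldl_cons, List.any_cons, ih]
    cases p x <;> simp

-- the merge scan on sorted lists decides exactly "some key is missing from the reference"
lemma mergeMiss_false_iff (ks ref : List String)
    (hk : ks.Pairwise (· ≤ ·)) (hr : ref.Pairwise (· ≤ ·)) :
    mergeMiss ks ref = false ↔ ∀ k ∈ ks, k ∈ ref := by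
  induction ks generalizing ref with
  | nil => simp [mergeMiss]
  | cons k ks ih =>
    have hk' := (List.pairwise_cons.mp hk).2
    have hkle := (List.pairwise_cons.mp hk).1
    -- membership transfer to the dropped reference
    have hdropmem : ∀ x, x ∈ ref.dropWhile (fun r => decide (r < k)) → x ∈ ref :=
      fun x hx => (List.dropWhile_sublist _).mem hx
    have hmem_of : ∀ x, k ≤ x → (x ∈ ref ↔ x ∈ ref.dropWhile (fun r => decide (r < k))) := by
      intro x hkx
      constructor
      · intro hx
        have := (List.takeWhile_append_dropWhile (p := fun r => decide (r < k)) (l := ref))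
        rw [← this] at hx
        rcases List.mem_append.mp hx with h | h
        · have hxk : decide (x < k) = true :=
            List.mem_takeWhile_imp (p := fun r => decide (r < k)) (l := ref) h
          exact absurd (of_decide_eq_true hxk) (not_lt.mpr hkx)
        · exact h
      · exact hdropmem x
    have hrd : (ref.dropWhile (fun r => decide (r < k))).Pairwise (· ≤ ·) :=
      hr.sublist (List.dropWhile_sublist _)
    unfold mergeMiss
    cases hd : ref.dropWhile (fun r => decide (r < k)) with
    | nil =>
      constructor
      · intro h; cases h
      · intro h
        have hkmem := h k (List.mem_cons_self ..)
        rw [hmem_of k le_rfl, hd] at hkmem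
        cases hkmem
    | cons r t =>
      have hkr : k ≤ r := by
        have h0 := List.head?_dropWhile_not (p := fun r => decide (r < k)) (l := ref)
        rw [hd] at h0
        exact not_lt.mp (of_decide_eq_false (by simpa using h0))
      rw [hd] at hrd hmem_of hdropmem
      by_cases hrk : r = k
      · subst hrk
        simp only [ne_eq, not_true_eq_false, if_false]
        rw [ih (r :: t) hk' hrd]
        constructor
        · intro h x hx
          rcases List.mem_cons.mp hx with rfl | hx'
          · exact hdropmem x (List.mem_cons_self ..)
          · exact hdropmem x ((h x hx'))
        · intro h x hx
          exact (hmem_of x (hkle x hx)).mp (h x (List.mem_cons.mpr (Or.inr hx)))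
      · simp only [ne_eq, hrk, not_false_eq_true, if_pos]
        constructor
        · intro h; cases h
        · intro h
          have hkmem := h k (List.mem_cons_self ..)
          rw [hmem_of k le_rfl] at hkmem
          rcases List.mem_cons.mp hkmem with rfl | hkt
          · exact (hrk rfl).elim
          · -- elements of t are ≥ r, and r ≥ k with r ≠ k
            have hrle : r ≤ k := (List.pairwise_cons.mp hrd).1 k hkt
            exact (hrk (le_antisymm hrle hkr)).elim

-- ===== VERDICT =====
theorem is_bad_request_spec : Claim_equal_is_bad_request := by
  intro body valid_keys _
  unfold Spec_is_bad_request is_bad_request is_bad_request_alt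
  simp only [List.map_id_fun', id, foldl_flag, Bool.false_or]
  have hks : (PySem.List.sorted (PySem.Dict.keys (PySem.Dict.mk body)) (fun x => x) false).Pairwise (· ≤ ·) :=
    PySem.List.sorted_pairwise (xs := PySem.Dict.keys (PySem.Dict.mk body)) (key := fun x => x)
  have hrs : (PySem.List.sorted valid_keys (fun x => x) false).Pairwise (· ≤ ·) :=
    PySem.List.sorted_pairwise (xs := valid_keys) (key := fun x => x)
  have hmm := mergeMiss_false_iff _ _ hks hrs
  have hfalse : ((PySem.Dict.keys (PySem.Dict.mk body)).any fun k => !valid_keys.contains k) = false ↔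
      mergeMiss (PySem.List.sorted (PySem.Dict.keys (PySem.Dict.mk body)) (fun x => x) false)
        (PySem.List.sorted valid_keys (fun x => x) false) = false := by
    rw [hmm]
    simp [List.any_eq_false, PySem.List.mem_sorted]
  cases hA : ((PySem.Dict.keys (PySem.Dict.mk body)).any fun k => !valid_keys.contains k) <;>
    cases hB : mergeMiss (PySem.List.sorted (PySem.Dict.keys (PySem.Dict.mk body)) (fun x => x) false)
        (PySem.List.sorted valid_keys (fun x => x) false)
  · rfl
  · rw [hA, hB] at hfalse; simp at hfalse
  · rw [hA, hB] at hfalse; simp at hfalse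
  · rfl
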